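-- pv_equiv track=rewrite | github.com/Suhruth9/Spoken_to_Written | spoken2written/processing_text.py | abbrevations
-- ===== SOURCE A (Python) =====
-- def rem_elems(text_list, r):
--     for i in range(len(r)):
--         text_list.pop(r[i] - i)
--
--     return (text_list)
--
-- def abbrevations(text_list):
--     l = len(text_list)
--     i = 0
--     r = []
--     while i < l:
--         p = text_list[i]
--         k = i
--         if len(p)==1 and p.isalpha():
--             while i+1 < l and len(text_list[i+1]) == 1 and text_list[i+1].isalpha():
--                 i+=1
--                 text_list[k] += text_list[i]
--                 r.append(i)
--
--             if text_list[k] != 'a':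
--                 text_list[k] = text_list[k].upper()
--
--         i+=1
--
--
--     text_list = rem_elems(text_list, r)
--
--     return (text_list)
-- ===== SOURCE B (Python) =====
-- def _single(t):
--     return len(t) == 1 and t.isalpha()
--
-- def _emit_run(run):
--     if not run:
--         return []
--     w = ''.join(run)
--     return [w if w == 'a' else w.upper()]
--
-- def abbrevations(text_list):
--     out = []
--     run = []
--     for t in text_list:
--         if _single(t):
--             run.append(t)
--         else:
--             out.extend(_emit_run(run))
--             out.append(t)
--             run = []
--     out.extend(_emit_run(run))
--     text_list[:] = out
--     return text_list
-- ===== Notes on version B (the rewrite author's own statement) =====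
-- stated objective: faster
-- what changed: Replaces A's index/while scan that merges run members into slot k, records absorbed indices in r and then deletes them with adjusted pops, by a single left-to-right fold that accumulates the current single-letter run and flushes it (joined, uppercased unless it is 'a') when the run ends, building a fresh output list with no deletion pass.
import Mathlib
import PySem

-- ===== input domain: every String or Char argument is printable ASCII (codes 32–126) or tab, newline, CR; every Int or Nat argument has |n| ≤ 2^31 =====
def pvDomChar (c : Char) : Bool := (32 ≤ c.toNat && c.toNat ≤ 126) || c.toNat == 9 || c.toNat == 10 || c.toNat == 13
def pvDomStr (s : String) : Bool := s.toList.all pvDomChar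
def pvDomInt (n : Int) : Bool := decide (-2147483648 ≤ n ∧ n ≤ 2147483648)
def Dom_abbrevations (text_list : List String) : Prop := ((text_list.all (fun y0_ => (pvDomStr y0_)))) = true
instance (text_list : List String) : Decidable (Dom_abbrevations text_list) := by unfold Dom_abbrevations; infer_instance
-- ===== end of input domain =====

-- B merges each maximal run of single-letter tokens in one fold (flushing the joined,
-- uppercased-unless-'a' run) instead of A's index/while merge plus an adjusted-pop deletion
-- pass: one pass, no removal list (measured faster in a timing run).  Both Pythons mutate their argument in place to
-- the same final contents; the equivalence proved here is about the returned value.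

-- ===== PORT A =====

-- len(t)==1 and t.isalpha()
def pvSingle (t : String) : Bool := PySem.Str.len t == 1 && PySem.Str.strIsalpha t

-- inner while loop of A: while i+1 < l and single(text_list[i+1]): i+=1; text_list[k]+=text_list[i]; r.append(i)
-- (indices are always in range in A, so list reads use getD; exact here)
-- fuel (= l - i at each entry) only makes the recursion structural; it is never exhausted
-- before the loop condition fails, so the loop body is exactly A's
def abbrInner (fuel : Nat) (lst : List String) (l i k : Nat) (r : List Nat) :
    List String × Nat × List Nat :=
  match fuel with
  | 0 => (lst, i, r)
  | f + 1 =>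
    if i + 1 < l ∧ pvSingle (lst.getD (i+1) "") then
      abbrInner f (lst.set k (lst.getD k "" ++ lst.getD (i+1) "")) l (i+1) k (r ++ [i+1])
    else (lst, i, r)

-- outer while loop of A
def abbrOuter (fuel : Nat) (lst : List String) (l i : Nat) (r : List Nat) :
    List String × List Nat :=
  match fuel with
  | 0 => (lst, r)
  | f + 1 =>
    if i < l then
      let p := lst.getD i ""
      let k := i
      if pvSingle p then
        let res := abbrInner (l - i) lst l i k r
        let lst1 := res.1
        let i1 := res.2.1
        let r1 := res.2.2
        let lst2 := if lst1.getD k "" ≠ "a" then lst1.set k (PySem.Str.upper (lst1.getD k "")) else lst1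
        abbrOuter f lst2 l (i1 + 1) r1
      else abbrOuter f lst l (i + 1) r
    else (lst, r)

-- rem_elems: for i in range(len(r)): text_list.pop(r[i]-i)   (counter j tracks i)
def remGo (lst : List String) (r : List Nat) (j : Nat) : List String :=
  match r with
  | [] => lst
  | a :: s =>
      let popped := match PySem.List.pop? lst ((a : Int) - (j : Int)) with
        | some pr => pr.2
        | none => lst   -- never reached in A's use: the popped index is always in range
      remGo popped s (j + 1)

def rem_elems (text_list : List String) (r : List Nat) : List String :=
  remGo text_list r 0

def abbrevations (text_list : List String) : List String :=
  let l := text_list.length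
  let res := abbrOuter l text_list l 0 []
  rem_elems res.1 res.2

-- ===== PORT B =====

-- [w if w=='a' else w.upper()] for a non-empty run, [] for the empty one
def pvEmitRun (run : List String) : List String :=
  if run = [] then []
  else
    let w := PySem.Str.join "" run
    [if w = "a" then w else PySem.Str.upper w]

def abbrevations_alt (text_list : List String) : List String :=
  let st := text_list.foldl
    (fun (st : List String × List String) t =>
      if pvSingle t then (st.1, st.2 ++ [t])
      else (st.1 ++ pvEmitRun st.2 ++ [t], []))
    ([], [])
  st.1 ++ pvEmitRun st.2

-- ===== PRECONDITION & SPEC =====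
def Spec_abbrevations (text_list : List String) (out : List String) : Prop := out = abbrevations_alt text_list
instance (text_list : List String) (out : List String) : Decidable (Spec_abbrevations text_list out) := by unfold Spec_abbrevations; infer_instance

-- ===== CLAIM (what is proved, stated in full; the proofs are below) =====
def Claim_equal_abbrevations : Prop := ∀ (text_list : List String), Dom_abbrevations text_list → Spec_abbrevations text_list (abbrevations text_list)

-- ===== LEMMAS AND PROOFS =====

-- reference grouping recursion: `run` is the single-letter run collected so far
def groupGo (run : List String) : List String → List String
  | [] => pvEmitRun run
  | x :: xs => if pvSingle x then groupGo (run ++ [x]) xs else pvEmitRun run ++ x :: groupGo [] xs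

-- keep exactly the elements whose global index (base n) is not in s
def removeFrom (lst : List String) (s : List Nat) (n : Nat) : List String :=
  match lst with
  | [] => []
  | x :: xs => if n ∈ s then removeFrom xs s (n+1) else x :: removeFrom xs s (n+1)

-- B's fold equals the grouping recursion
theorem foldl_eq_groupGo (lst : List String) (out run : List String) :
    (lst.foldl (fun (st : List String × List String) t =>
        if pvSingle t then (st.1, st.2 ++ [t])
        else (st.1 ++ pvEmitRun st.2 ++ [t], [])) (out, run)).1 ++
      pvEmitRun (lst.foldl (fun (st : List String × List String) t =>
        if pvSingle t then (st.1, st.2 ++ [t])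
        else (st.1 ++ pvEmitRun st.2 ++ [t], [])) (out, run)).2
      = out ++ groupGo run lst := by
  induction lst generalizing out run with
  | nil => simp [groupGo]
  | cons x xs ih =>
      simp only [List.foldl_cons, groupGo]
      by_cases hx : pvSingle x
      · simp only [hx, if_true]; exact ih out (run ++ [x])
      · simp only [hx, if_false, Bool.false_eq_true]
        rw [ih (out ++ pvEmitRun run ++ [x]) []]
        simp

theorem alt_eq_groupGo (lst : List String) : abbrevations_alt lst = groupGo [] lst := by
  have := foldl_eq_groupGo lst [] []
  simpa [abbrevations_alt] using this

-- unrolling a whole single-letter run at once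
theorem groupGo_run (rest : List String) (run : List String) :
    groupGo run rest =
      pvEmitRun (run ++ rest.takeWhile pvSingle) ++
        groupGo [] (rest.drop (rest.takeWhile pvSingle).length) := by
  induction rest generalizing run with
  | nil => simp [groupGo, pvEmitRun]
  | cons x xs ih =>
      by_cases hx : pvSingle x
      · simp only [groupGo, hx, if_true, List.takeWhile_cons, List.length_cons, List.drop_succ_cons]
        rw [ih (run ++ [x])]
        simp
      · simp only [groupGo, hx, if_false, Bool.false_eq_true, List.takeWhile_cons]
        simp [hx, pvEmitRun, groupGo]

-- removeFrom only looks at membership at indices ≥ n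
theorem removeFrom_congr (lst : List String) (s₁ s₂ : List Nat) (n : Nat)
    (h : ∀ m, n ≤ m → (m ∈ s₁ ↔ m ∈ s₂)) : removeFrom lst s₁ n = removeFrom lst s₂ n := by
  induction lst generalizing n with
  | nil => rfl
  | cons x xs ih =>
      have hn := h n le_rfl
      have ih' := ih (n+1) (fun m hm => h m (by omega))
      by_cases hmem : n ∈ s₁
      · simp [removeFrom, hmem, hn.mp hmem, ih']
      · have : n ∉ s₂ := fun hc => hmem (hn.mpr hc)
        simp [removeFrom, hmem, this, ih']

-- a block of elements whose indices are all removed is skipped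
theorem removeFrom_append_skip (u v : List String) (s : List Nat) (n : Nat)
    (h : ∀ p, p < u.length → n + p ∈ s) :
    removeFrom (u ++ v) s n = removeFrom v s (n + u.length) := by
  induction u generalizing n with
  | nil => simp
  | cons x xs ih =>
      have h0 : n ∈ s := by simpa using h 0 (by simp)
      simp only [List.cons_append, removeFrom, h0, if_true]
      rw [ih (n+1) (fun p hp => by
        have := h (p+1) (by simpa using hp)
        have e : n + 1 + p = n + (p + 1) := by omega
        rwa [e])]
      have e : n + 1 + xs.length = n + (x :: xs).length := by simp; omega
      rw [e]

theorem removeFrom_nil (lst : List String) (n : Nat) : removeFrom lst [] n = lst := by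
  induction lst generalizing n with
  | nil => rfl
  | cons x xs ih => simp [removeFrom, ih]

theorem removeFrom_eraseIdx (lst : List String) (a : Nat) (s : List Nat) (n : Nat)
    (hna : n ≤ a) (ha : a - n < lst.length) (hs : ∀ m ∈ s, a < m) :
    removeFrom lst (a :: s) n = removeFrom (lst.eraseIdx (a - n)) s (n+1) := by
  induction lst generalizing n with
  | nil => simp at ha
  | cons y ys ih =>
      by_cases hna' : n = a
      · subst hna'
        have h0 : n - n = 0 := by omega
        simp only [removeFrom, List.mem_cons, h0, List.eraseIdx_cons_zero]
        exact removeFrom_congr ys (n :: s) s (n+1)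
          (fun m hm => by
            constructor
            · intro hc
              rcases List.mem_cons.mp hc with h | h
              · omega
              · exact h
            · intro hc; exact List.mem_cons_of_mem _ hc)
      · have hlt : n < a := by omega
        have hn1 : ¬ n ∈ a :: s := by
          intro hc
          rcases List.mem_cons.mp hc with h | h
          · omega
          · have := hs n h; omega
        have hn2 : ¬ (n+1) ∈ s := by
          intro hc; have := hs _ hc; omega
        have he : a - n = (a - (n+1)) + 1 := by omega
        rw [removeFrom, if_neg hn1, he, List.eraseIdx_cons_succ]
        rw [show removeFrom (y :: ys.eraseIdx (a - (n+1))) s (n+1)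
              = y :: removeFrom (ys.eraseIdx (a - (n+1))) s (n+1+1) from by
            rw [removeFrom, if_neg hn2]]
        rw [ih (n+1) (by omega) (by simp at ha ⊢; omega)]

-- the adjusted-pop loop removes exactly the (sorted, in-range) recorded indices
theorem remGo_eq_removeFrom (s : List Nat) (lst : List String) (j : Nat)
    (hsort : List.Pairwise (· < ·) s) (hb : ∀ m ∈ s, j ≤ m ∧ m - j < lst.length) :
    remGo lst s j = removeFrom lst s j := by
  induction s generalizing lst j with
  | nil => simp [remGo, removeFrom_nil]
  | cons a s ih =>
      obtain ⟨hja, halen⟩ := hb a (List.mem_cons_self ..)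
      have hcast : ((a : Int) - (j : Int)) = ((a - j : Nat) : Int) := by omega
      have hpop : PySem.List.pop? lst ((a : Int) - (j : Int))
          = some (lst[a - j]'halen, lst.eraseIdx (a - j)) := by
        rw [hcast]
        exact PySem.List.pop?_natCast lst (a - j) halen
      have hmono : ∀ m ∈ s, a < m := by
        intro m hm
        exact (List.pairwise_cons.mp hsort).1 m hm
      rw [remGo]
      simp only [hpop]
      rw [ih (lst.eraseIdx (a - j)) (j+1) (List.Pairwise.sublist (List.sublist_cons_self a s) hsort)
        (fun m hm => by
          have := hmono m hm
          have := (hb m (List.mem_cons_of_mem _ hm)).2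
          rw [List.length_eraseIdx]
          simp [halen]
          omega)]
      rw [← removeFrom_eraseIdx lst a s j hja halen hmono]

-- ''.join(x::run) is the left fold of ++
theorem join_empty_eq_foldl (x : String) (run : List String) :
    PySem.Str.join "" (x :: run) = run.foldl (· ++ ·) x := by
  induction run generalizing x with
  | nil =>
      apply String.toList_injective
      simp [PySem.Str.toList_join, PySem.Chars.join_singleton]
  | cons y ys ih =>
      have step : PySem.Str.join "" (x :: y :: ys) = PySem.Str.join "" ((x ++ y) :: ys) := by
        apply String.toList_injective
        cases ys with
        | nil => simp [PySem.Str.toList_join, PySem.Chars.join_cons_cons, PySem.Chars.join_singleton]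
        | cons z zs =>
            simp [PySem.Str.toList_join, PySem.Chars.join_cons_cons]
      rw [step, ih (x ++ y)]
      rfl

theorem set_getD_self (lst : List String) (k : Nat) (hk : k < lst.length) :
    lst.set k (lst.getD k "") = lst := by
  apply List.ext_getElem?
  intro n
  rw [List.getElem?_set]
  split
  · next hnk =>
      subst hnk
      simp [List.getD, hk]
  · rfl

-- closed form of A's inner merge loop
theorem abbrInner_eq (fuel l : Nat) (lst : List String) (i k : Nat) (r : List Nat) :
    lst.length = l → k ≤ i → k < l → l - i ≤ fuel →
    abbrInner fuel lst l i k r =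
      (lst.set k (((lst.drop (i+1)).takeWhile pvSingle).foldl (· ++ ·) (lst.getD k "")),
       i + ((lst.drop (i+1)).takeWhile pvSingle).length,
       r ++ List.range' (i+1) ((lst.drop (i+1)).takeWhile pvSingle).length) := by
  induction fuel generalizing lst i r with
  | zero =>
      intro hl hk hkl hf
      have hrun : (lst.drop (i+1)).takeWhile pvSingle = [] := by
        rw [List.drop_eq_nil_of_le (by omega), List.takeWhile_nil]
      rw [hrun]
      simp only [abbrInner, List.foldl_nil, List.length_nil, Nat.add_zero, List.range'_zero,
        List.append_nil]
      rw [set_getD_self lst k (by omega)]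
  | succ f ih =>
      intro hl hk hkl hf
      by_cases hcond : i + 1 < l ∧ pvSingle (lst.getD (i+1) "") = true
      · obtain ⟨hil, hsing⟩ := hcond
        have hil' : i + 1 < lst.length := by omega
        have hdrop : lst.drop (i+1) = lst[i+1] :: lst.drop (i+2) := List.drop_eq_getElem_cons hil'
        have hget : lst.getD (i+1) "" = lst[i+1] := List.getD_eq_getElem lst "" hil'
        have hsing' : pvSingle (lst[i+1]'hil') = true := by rwa [hget] at hsing
        set v := lst.getD k "" ++ lst.getD (i+1) "" with hv
        have hlen' : (lst.set k v).length = l := by simpa using hl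
        have ih' := ih (lst.set k v) (i+1) (r ++ [i+1]) hlen' (by omega) hkl (by omega)
        have hdropset : (lst.set k v).drop (i+2) = lst.drop (i+2) := by
          rw [List.drop_set, if_pos (by omega)]
        have hgetset : (lst.set k v).getD k "" = v :=
          List.getD_eq_getElem _ "" (by simpa [hl] using hkl) |>.trans
            (List.getElem_set_self (by simpa [hl] using hkl))
        rw [abbrInner, if_pos ⟨hil, hsing⟩, ih', hdropset, hgetset]
        rw [hdrop]
        simp only [List.takeWhile_cons, hsing', if_true, List.length_cons, List.foldl_cons,
          List.set_set, List.range'_succ]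
        refine Prod.ext ?_ (Prod.ext ?_ ?_)
        · show lst.set k _ = lst.set k _
          rw [hv, hget]
        · simp; omega
        · simp
      · have hrun : (lst.drop (i+1)).takeWhile pvSingle = [] := by
          by_cases hil : i + 1 < l
          · have hil' : i + 1 < lst.length := by omega
            have hdrop : lst.drop (i+1) = lst[i+1] :: lst.drop (i+2) := List.drop_eq_getElem_cons hil'
            have hget : lst.getD (i+1) "" = lst[i+1] := List.getD_eq_getElem lst "" hil'
            have hns : ¬ pvSingle (lst.getD (i+1) "") = true := fun hc => hcond ⟨hil, hc⟩
            rw [hdrop, List.takeWhile_cons, if_neg (by rwa [hget] at hns)]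
          · rw [List.drop_eq_nil_of_le (by omega), List.takeWhile_nil]
        rw [hrun]
        simp only [abbrInner, if_neg hcond, List.foldl_nil, List.length_nil, Nat.add_zero,
          List.range'_zero, List.append_nil]
        rw [set_getD_self lst k (by omega)]

-- the main invariant of A's outer loop
theorem abbrOuter_eq (fuel l : Nat) (lst : List String) (i : Nat) (r : List Nat)
    (hlen : lst.length = l) (hil : i ≤ l) (hf : l - i ≤ fuel) :
    ∃ s, (abbrOuter fuel lst l i r).2 = r ++ s ∧
      (abbrOuter fuel lst l i r).1.length = l ∧
      (abbrOuter fuel lst l i r).1.take i = lst.take i ∧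
      (∀ m ∈ s, i < m ∧ m < l) ∧
      List.Pairwise (· < ·) s ∧
      removeFrom ((abbrOuter fuel lst l i r).1.drop i) s i = groupGo [] (lst.drop i) := by
  induction fuel generalizing lst i r with
  | zero =>
      have hdrop : lst.drop i = [] := List.drop_eq_nil_of_le (by omega)
      exact ⟨[], by simp [abbrOuter], by simp [abbrOuter, hlen], by simp [abbrOuter], by simp,
        by simp, by simp [abbrOuter, hdrop, removeFrom, groupGo, pvEmitRun]⟩
  | succ f ih =>
      by_cases h : i < l
      case neg =>
        have hdrop : lst.drop i = [] := List.drop_eq_nil_of_le (by omega)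
        refine ⟨[], ?_, ?_, ?_, by simp, by simp, ?_⟩ <;>
          simp [abbrOuter, if_neg h, hlen, hdrop, removeFrom, groupGo, pvEmitRun]
      case pos =>
      by_cases hp : pvSingle (lst.getD i "") = true
      -- single-letter head: one whole run is merged, recorded and later removed
      case pos =>
        have hiL : i < lst.length := by omega
        set run := (lst.drop (i+1)).takeWhile pvSingle with hrunE
        set rl := run.length with hrlE
        set acc := run.foldl (· ++ ·) (lst.getD i "") with haccE
        set w := (if acc = "a" then acc else PySem.Str.upper acc) with hwE
        set t := List.range' (i+1) rl with htE
        have hrl : rl ≤ l - (i+1) := by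
          have h1 := (List.takeWhile_sublist (l := lst.drop (i+1)) (p := pvSingle)).length_le
          rw [List.length_drop, hlen] at h1
          exact h1
        have hres : abbrInner (l - i) lst l i i r = (lst.set i acc, i + rl, r ++ t) :=
          abbrInner_eq (l - i) l lst i i r hlen le_rfl (by omega) le_rfl
        have hacc1 : (lst.set i acc).getD i "" = acc := by
          rw [List.getD_eq_getElem _ "" (by simp [hlen]; omega), List.getElem_set_self]
        have hif : (if (lst.set i acc).getD i "" ≠ "a"
              then (lst.set i acc).set i (PySem.Str.upper ((lst.set i acc).getD i ""))
              else (lst.set i acc)) = lst.set i w := by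
          rw [hacc1]
          by_cases hA : acc = "a"
          · rw [if_neg (by simp [hA]), hwE, if_pos hA]
          · rw [if_pos hA, List.set_set, hwE, if_neg hA]
        have hstep : abbrOuter (f+1) lst l i r = abbrOuter f (lst.set i w) l (i + rl + 1) (r ++ t) := by
          rw [abbrOuter]
          simp only [if_pos h, hp, if_true, hres, hif]
        rw [hstep]
        have hlen2 : (lst.set i w).length = l := by simp [hlen]
        obtain ⟨s', h1, h2, h3, h4, h5, h6⟩ :=
          ih (lst.set i w) (i + rl + 1) (r ++ t) hlen2 (by omega) (by omega)
        have hmemt : ∀ m ∈ t, i + 1 ≤ m ∧ m < i + 1 + rl := by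
          intro m hm; exact List.mem_range'_1.mp hm
        refine ⟨t ++ s', ?_, h2, ?_, ?_, ?_, ?_⟩
        · rw [h1, List.append_assoc]
        · have h3' := congrArg (List.take i) h3
          simp only [List.take_take, Nat.min_eq_left (by omega : i ≤ i + rl + 1)] at h3'
          rw [h3', List.take_set]
          apply List.set_eq_of_length_le
          simp [List.length_take]
        · intro m hm
          rcases List.mem_append.mp hm with hm | hm
          · have := hmemt m hm; omega
          · have := h4 m hm; omega
        · refine List.pairwise_append.mpr ⟨List.pairwise_lt_range' 1, h5, ?_⟩
          intro a ha b hb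
          have := hmemt a ha
          have := h4 b hb
          omega
        · have hiX : i < (abbrOuter f (lst.set i w) l (i + rl + 1) (r ++ t)).1.length := by omega
          have hi2 : i < (lst.set i w).length := by omega
          have hXi : (abbrOuter f (lst.set i w) l (i + rl + 1) (r ++ t)).1[i]'hiX = w := by
            have hc := congrArg (fun u => u[i]?) h3
            simp only [List.getElem?_take, if_pos (by omega : i < i + rl + 1)] at hc
            rw [List.getElem?_eq_getElem hiX, List.getElem?_eq_getElem hi2] at hc
            have h2i : (lst.set i w)[i]'hi2 = w := List.getElem_set_self (by omega)
            exact (Option.some.inj hc).trans h2i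
          rw [List.drop_eq_getElem_cons hiX, removeFrom,
            if_neg (fun hc => by
              rcases List.mem_append.mp hc with hc | hc
              · have := hmemt i hc; omega
              · have := h4 i hc; omega)]
          have hsplit : (abbrOuter f (lst.set i w) l (i + rl + 1) (r ++ t)).1.drop (i+1)
              = ((abbrOuter f (lst.set i w) l (i + rl + 1) (r ++ t)).1.drop (i+1)).take rl
                ++ (abbrOuter f (lst.set i w) l (i + rl + 1) (r ++ t)).1.drop (i + rl + 1) := by
            conv_lhs => rw [← List.take_append_drop rl
              ((abbrOuter f (lst.set i w) l (i + rl + 1) (r ++ t)).1.drop (i+1))]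
            rw [List.drop_drop, show i + 1 + rl = i + rl + 1 by omega]
          have hulen : (((abbrOuter f (lst.set i w) l (i + rl + 1) (r ++ t)).1.drop (i+1)).take rl).length = rl := by
            simp only [List.length_take, List.length_drop, h2]
            omega
          rw [hsplit, removeFrom_append_skip _ _ _ _ (fun q hq => by
            rw [hulen] at hq
            exact List.mem_append.mpr (Or.inl (List.mem_range'_1.mpr ⟨by omega, by omega⟩)))]
          rw [hulen, show i + 1 + rl = i + rl + 1 by omega]
          rw [removeFrom_congr _ (t ++ s') s' (i + rl + 1) (fun m hm => by
            constructor
            · intro hc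
              rcases List.mem_append.mp hc with hc | hc
              · have := hmemt m hc; omega
              · exact hc
            · exact fun hc => List.mem_append.mpr (Or.inr hc))]
          rw [h6, show (lst.set i w).drop (i + rl + 1) = lst.drop (i + rl + 1) by
            rw [List.drop_set, if_pos (by omega)]]
          -- right-hand side: peel the whole run off the grouping recursion
          have hgd : lst.getD i "" = lst[i]'hiL := List.getD_eq_getElem lst "" hiL
          rw [List.drop_eq_getElem_cons hiL]
          have hpX : pvSingle (lst[i]'hiL) = true := by rwa [hgd] at hp
          simp only [groupGo, hpX, if_true, List.nil_append]
          have hjoin : PySem.Str.join "" ((lst[i]'hiL) :: run) = acc := by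
            rw [join_empty_eq_foldl, haccE, hgd]
          have hemit : pvEmitRun ([lst[i]'hiL] ++ run) = [w] := by
            rw [show ([lst[i]'hiL] ++ run) = ((lst[i]'hiL) :: run) from rfl,
              pvEmitRun, if_neg (by simp), hjoin, hwE]
          have hRHS : groupGo [lst[i]'hiL] (lst.drop (i+1))
              = w :: groupGo [] (lst.drop (i + rl + 1)) := by
            rw [groupGo_run (lst.drop (i+1)) [lst[i]'hiL], ← hrunE, hemit, List.drop_drop,
              show (i + 1) + rl = i + rl + 1 by omega]
            rfl
          rw [hRHS, hXi]
      -- not-single head: step past it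
      case neg =>
        have hstep : abbrOuter (f+1) lst l i r = abbrOuter f lst l (i + 1) r := by
          rw [abbrOuter]
          simp only [if_pos h, hp, if_false, Bool.false_eq_true]
        rw [hstep]
        obtain ⟨s, h1, h2, h3, h4, h5, h6⟩ := ih lst (i+1) r hlen (by omega) (by omega)
        refine ⟨s, h1, h2, ?_, fun m hm => by have := h4 m hm; omega, h5, ?_⟩
        · have h3' := congrArg (List.take i) h3
          simp only [List.take_take, Nat.min_eq_left (by omega : i ≤ i + 1)] at h3'
          exact h3'
        · have hiX : i < (abbrOuter f lst l (i + 1) r).1.length := by omega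
          have hiL : i < lst.length := by omega
          have hXi : (abbrOuter f lst l (i + 1) r).1[i]'hiX = lst[i]'hiL := by
            have hc := congrArg (fun u => u[i]?) h3
            simp only [List.getElem?_take, if_pos (Nat.lt_succ_self i)] at hc
            rw [List.getElem?_eq_getElem hiX, List.getElem?_eq_getElem hiL] at hc
            exact Option.some.inj hc
          rw [List.drop_eq_getElem_cons hiX, List.drop_eq_getElem_cons hiL]
          have hnotmem : i ∉ s := fun hc => by have := h4 i hc; omega
          rw [removeFrom, if_neg hnotmem, h6, hXi]
          have hpi : ¬ pvSingle (lst[i]'hiL) = true := by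
            have hp' : ¬ pvSingle (lst.getD i "") = true := hp
            rwa [List.getD_eq_getElem lst "" hiL] at hp'
          simp [groupGo, hpi, pvEmitRun]

-- ===== VERDICT (by name: the statement is the Claim_ definition above) =====
theorem abbrevations_spec : Claim_equal_abbrevations := by
  intro lst _
  unfold Spec_abbrevations
  obtain ⟨s, hr, hlen, -, hb, hsort, he⟩ := abbrOuter_eq lst.length lst.length lst 0 [] rfl (Nat.zero_le _) (by omega)
  show remGo (abbrOuter lst.length lst lst.length 0 []).1 (abbrOuter lst.length lst lst.length 0 []).2 0
      = abbrevations_alt lst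
  rw [hr, List.nil_append, remGo_eq_removeFrom s _ 0 hsort
    (fun m hm => ⟨Nat.zero_le _, by have := hb m hm; omega⟩)]
  rw [show removeFrom (abbrOuter lst.length lst lst.length 0 []).1 s 0
        = removeFrom ((abbrOuter lst.length lst lst.length 0 []).1.drop 0) s 0 by rw [List.drop_zero]]
  rw [he, List.drop_zero, alt_eq_groupGo]
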